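-- pv_equiv track=rewrite | github.com/a-hygge/Chatbot-Code-PTIT-Extension | chatbot.py | find_relevant_videos_fallback
-- ===== SOURCE A (Python) =====
-- from typing import Dict, List
--
-- def find_relevant_videos_fallback(question: str, videos: List[Dict]) -> List[Dict]:
--     """Phương pháp dự phòng để tìm video phù hợp"""
--     question_lower = question.lower()
--     scored_videos = []
--
--     for video in videos:
--         title = video.get('title', '').lower()
--         description = video.get('description', '').lower()
--         content = title + " " + description
--
--         score = 0
--         question_words = question_lower.split()
--
--         for word in question_words:
--             if len(word) > 2:
--                 score += content.count(word) * 2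
--                 if word in title:
--                     score += 3
--
--         if score > 0:
--             scored_videos.append((score, video))
--
--     if scored_videos:
--         scored_videos.sort(key=lambda x: x[0], reverse=True)
--         if scored_videos[0][0] >= 4:
--             return [scored_videos[0][1]]
--
--     return []
-- ===== SOURCE B (Python) =====
-- def _video_score(question_words, video):
--     title = video.get('title', '').lower()
--     description = video.get('description', '').lower()
--     content = title + " " + description
--     score = 0
--     for word in question_words:
--         if len(word) > 2:
--             score += content.count(word) * 2
--             if word in title:
--                 score += 3
--     return score
--
-- def find_relevant_videos_fallback(question, videos):
--     """Single-pass selection: track the first strictly-best-scoring video; no list, no sort."""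
--     question_words = question.lower().split()
--     best_score = 0
--     best_video = None
--     for video in videos:
--         score = _video_score(question_words, video)
--         if score > best_score:
--             best_score = score
--             best_video = video
--     return [best_video] if best_score >= 4 else []
-- ===== Notes on version B (the rewrite author's own statement) =====
-- stated objective: simpler
-- what changed: Replaced the collect-scored-list-then-stable-reverse-sort selection with a single linear pass keeping a running best (strict '>' so the first maximal video wins ties, like the stable sort), eliminating the intermediate list and the sort; Pre_ only rules out videos whose 'title'/'description' key is duplicated in the association-list encoding, which no Python dict input can be.
import Mathlib
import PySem

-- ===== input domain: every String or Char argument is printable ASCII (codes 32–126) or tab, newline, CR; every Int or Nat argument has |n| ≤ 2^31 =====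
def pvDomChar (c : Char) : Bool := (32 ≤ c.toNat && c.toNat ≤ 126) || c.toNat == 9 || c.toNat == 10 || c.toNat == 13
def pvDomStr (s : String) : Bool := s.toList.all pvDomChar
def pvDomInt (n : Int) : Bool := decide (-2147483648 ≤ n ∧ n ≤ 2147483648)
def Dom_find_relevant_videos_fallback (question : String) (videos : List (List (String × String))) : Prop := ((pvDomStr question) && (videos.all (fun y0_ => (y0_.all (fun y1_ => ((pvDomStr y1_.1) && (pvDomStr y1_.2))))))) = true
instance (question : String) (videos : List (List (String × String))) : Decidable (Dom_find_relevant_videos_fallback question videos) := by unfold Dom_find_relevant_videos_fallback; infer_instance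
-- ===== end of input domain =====

-- B replaces A's collect-then-stable-reverse-sort selection by a single running-best pass
-- (strict '>' keeps the first maximal video, like the stable sort): simpler, no list, no sort.

-- shared scoring helper: the per-video scoring loop, identical in both Pythons
def pvScoreWords (question_words : List String) (video : List (String × String)) : Int :=
  let title := PySem.Str.lower (PySem.Dict.getD (PySem.Dict.mk video) "title" "")
  let description := PySem.Str.lower (PySem.Dict.getD (PySem.Dict.mk video) "description" "")
  let content := title ++ " " ++ description
  question_words.foldl (fun score word =>
    if 2 < PySem.Str.len word then
      let score := score + (PySem.Str.count content word : Int) * 2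
      if PySem.Str.isIn word title then score + 3 else score
    else score) 0

-- ===== PORT A =====
def find_relevant_videos_fallback (question : String) (videos : List (List (String × String))) : List (List (String × String)) :=
  let question_lower := PySem.Str.lower question
  let scored := videos.foldl (fun acc video =>
    let score := pvScoreWords (PySem.Str.split₀ question_lower) video
    if 0 < score then acc ++ [(score, video)] else acc) []
  if scored.isEmpty then []
  else
    let ss := PySem.List.sorted scored (fun x => x.1) true
    if 4 ≤ (PySem.List.pyGetD ss 0 (0, [])).1 then [(PySem.List.pyGetD ss 0 (0, [])).2] else []

-- ===== PORT B =====
def find_relevant_videos_fallback_alt (question : String) (videos : List (List (String × String))) : List (List (String × String)) :=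
  let question_words := PySem.Str.split₀ (PySem.Str.lower question)
  let best := videos.foldl (fun (best : Int × Option (List (String × String))) video =>
    let score := pvScoreWords question_words video
    if best.1 < score then (score, some video) else best) (0, none)
  if 4 ≤ best.1 then
    match best.2 with
    | some v => [v]
    | none => []
  else []

-- ===== PRECONDITION & SPEC =====
-- Pre_ only rules out association lists no Python dict input can be: A's two lookups are by the keys
-- 'title' and 'description', so each of those keys must occur at most once per video (Python dicts
-- cannot carry duplicate keys; the List (String × String) encoding could).
def Pre_find_relevant_videos_fallback (question : String) (videos : List (List (String × String))) : Prop :=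
  ∀ v ∈ videos, ((v.map Prod.fst).count "title" ≤ 1 ∧ (v.map Prod.fst).count "description" ≤ 1)
instance (question : String) (videos : List (List (String × String))) : Decidable (Pre_find_relevant_videos_fallback question videos) := by unfold Pre_find_relevant_videos_fallback; infer_instance
def pvWitness_find_relevant_videos_fallback : String × (List (List (String × String))) :=
  ("code ptit", [[("title", "video code ptit")], [("description", "abc")]])
def Spec_find_relevant_videos_fallback (question : String) (videos : List (List (String × String))) (out : List (List (String × String))) : Prop := out = find_relevant_videos_fallback_alt question videos
instance (question : String) (videos : List (List (String × String))) (out : List (List (String × String))) : Decidable (Spec_find_relevant_videos_fallback question videos out) := by unfold Spec_find_relevant_videos_fallback; infer_instance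

-- ===== CLAIM (what is proved, stated in full; the proofs are below) =====
def Claim_equal_find_relevant_videos_fallback : Prop := ∀ (question : String) (videos : List (List (String × String))), Dom_find_relevant_videos_fallback question videos → Pre_find_relevant_videos_fallback question videos → Spec_find_relevant_videos_fallback question videos (find_relevant_videos_fallback question videos)

-- ===== LEMMAS AND PROOFS =====

-- the "take the strictly better candidate" step; head of the stable reverse insertion sort folds with it
def pvBestG {V : Type} (o : Option (Int × V)) (x : Int × V) : Option (Int × V) :=
  match o with
  | none => some x
  | some h => if h.1 < x.1 then some x else some h

theorem pvHead_insertBy {V : Type} (x : Int × V) (acc : List (Int × V)) :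
    (PySem.List.insertBy (fun a b => decide (b.1 < a.1)) x acc).head? = pvBestG acc.head? x := by
  cases acc with
  | nil => simp [PySem.List.insertBy, pvBestG]
  | cons y ys =>
    simp only [PySem.List.insertBy, pvBestG, List.head?_cons]
    by_cases h : y.1 < x.1 <;> simp [h]

theorem pvHead_foldl_insertBy {V : Type} (l : List (Int × V)) (acc : List (Int × V)) :
    (l.foldl (fun a x => PySem.List.insertBy (fun a b => decide (b.1 < a.1)) x a) acc).head?
      = l.foldl pvBestG acc.head? := by
  induction l generalizing acc with
  | nil => rfl
  | cons x t ih =>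
    simp only [List.foldl_cons]
    rw [ih, pvHead_insertBy]

theorem pvSorted_head {V : Type} (l : List (Int × V)) :
    (PySem.List.sorted l (fun x => x.1) true).head? = l.foldl pvBestG none := by
  simpa [PySem.List.sorted] using pvHead_foldl_insertBy l []

theorem pvScored_eq (qws : List String) (videos : List (List (String × String)))
    (acc : List (Int × List (String × String))) :
    videos.foldl (fun acc v => if 0 < pvScoreWords qws v then acc ++ [(pvScoreWords qws v, v)] else acc) acc
      = acc ++ (videos.map (fun v => (pvScoreWords qws v, v))).filter (fun p => decide (0 < p.1)) := by
  induction videos generalizing acc with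
  | nil => simp
  | cons v t ih =>
    simp only [List.foldl_cons, List.map_cons, List.filter_cons]
    by_cases h : 0 < pvScoreWords qws v <;> simp [h, ih]

theorem pvScore_step_le (content title : String) (l : List String) (a : Int) :
    a ≤ l.foldl (fun score word =>
      if 2 < PySem.Str.len word then
        let score := score + (PySem.Str.count content word : Int) * 2
        if PySem.Str.isIn word title then score + 3 else score
      else score) a := by
  induction l generalizing a with
  | nil => simp
  | cons w t ih =>
    simp only [List.foldl_cons]
    refine le_trans ?_ (ih _)
    have : (0 : Int) ≤ (PySem.Str.count content w : Int) := Int.natCast_nonneg _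
    split_ifs <;> omega

theorem pvScore_nonneg (qws : List String) (v : List (String × String)) :
    0 ≤ pvScoreWords qws v := by
  unfold pvScoreWords
  exact pvScore_step_le _ _ _ 0

theorem pvBMain (qws : List String) (videos : List (List (String × String)))
    (st : Int × Option (List (String × String))) (h1 : 0 ≤ st.1) (h0 : st.2 = none → st.1 = 0) :
    (videos.foldl (fun b v => if b.1 < pvScoreWords qws v then (pvScoreWords qws v, some v) else b) st).2.map
        (fun v => ((videos.foldl (fun b v => if b.1 < pvScoreWords qws v then (pvScoreWords qws v, some v) else b) st).1, v))
      = ((videos.map (fun v => (pvScoreWords qws v, v))).filter (fun p => decide (0 < p.1))).foldl pvBestG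
          (st.2.map (fun v => (st.1, v)))
    ∧ 0 ≤ (videos.foldl (fun b v => if b.1 < pvScoreWords qws v then (pvScoreWords qws v, some v) else b) st).1
    ∧ ((videos.foldl (fun b v => if b.1 < pvScoreWords qws v then (pvScoreWords qws v, some v) else b) st).2 = none
        → (videos.foldl (fun b v => if b.1 < pvScoreWords qws v then (pvScoreWords qws v, some v) else b) st).1 = 0) := by
  induction videos generalizing st with
  | nil => exact ⟨rfl, h1, h0⟩
  | cons v t ih =>
    simp only [List.foldl_cons, List.map_cons, List.filter_cons]
    by_cases hp : 0 < pvScoreWords qws v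
    · simp only [hp, decide_true, if_pos]
      by_cases hlt : st.1 < pvScoreWords qws v
      · have hinit : pvBestG (st.2.map (fun u => (st.1, u))) (pvScoreWords qws v, v)
            = some (pvScoreWords qws v, v) := by
          cases st.2 <;> simp [pvBestG, hlt]
        rw [if_pos hlt, List.foldl_cons, hinit]
        have hih := ih (st := (pvScoreWords qws v, some v)) (pvScore_nonneg qws v) (by simp)
        simpa using hih
      · obtain ⟨w, hw⟩ : ∃ w, st.2 = some w := by
          cases hsnd : st.2 with
          | none => exact absurd (h0 hsnd ▸ hp) hlt
          | some w => exact ⟨w, rfl⟩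
        have hinit : pvBestG (st.2.map (fun u => (st.1, u))) (pvScoreWords qws v, v)
            = st.2.map (fun u => (st.1, u)) := by
          simp only [hw, Option.map_some, pvBestG]
          rw [if_neg hlt]
        rw [if_neg hlt, List.foldl_cons, hinit]
        exact ih (st := st) h1 h0
    · have hz : pvScoreWords qws v = 0 := le_antisymm (not_lt.mp hp) (pvScore_nonneg qws v)
      have hnlt : ¬ st.1 < pvScoreWords qws v := by rw [hz]; omega
      rw [if_neg hnlt]
      simp only [hp, decide_false, Bool.false_eq_true, if_false]
      exact ih (st := st) h1 h0

theorem find_relevant_videos_fallback_eq (question : String)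
    (videos : List (List (String × String))) :
    find_relevant_videos_fallback question videos
      = find_relevant_videos_fallback_alt question videos := by
  unfold find_relevant_videos_fallback find_relevant_videos_fallback_alt
  simp only [pvScored_eq (PySem.Str.split₀ (PySem.Str.lower question)) videos [], List.nil_append]
  obtain ⟨habs, hrpos, hrnone⟩ :=
    pvBMain (PySem.Str.split₀ (PySem.Str.lower question)) videos (0, none) (by simp) (fun _ => rfl)
  simp only [Option.map_none] at habs
  set r := videos.foldl
      (fun b v => if b.1 < pvScoreWords (PySem.Str.split₀ (PySem.Str.lower question)) v
        then (pvScoreWords (PySem.Str.split₀ (PySem.Str.lower question)) v, some v) else b)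
      ((0 : Int), (none : Option (List (String × String)))) with hr
  cases hsnil : (videos.map (fun v => (pvScoreWords (PySem.Str.split₀ (PySem.Str.lower question)) v, v))).filter
      (fun p => decide (0 < p.1)) with
  | nil =>
    rw [hsnil] at habs
    simp only [List.foldl_nil] at habs
    have h2 : r.2 = none := by
      cases h : r.2 with
      | none => rfl
      | some w => rw [h] at habs; simp at habs
    have h1 : r.1 = 0 := hrnone h2
    simp [h1]
  | cons p t =>
    rw [hsnil] at habs
    have hlen : (PySem.List.sorted (p :: t) (fun x : Int × List (String × String) => x.1) true).length
        = (p :: t).length := PySem.List.length_sorted _ _ _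
    have hnil : PySem.List.sorted (p :: t) (fun x : Int × List (String × String) => x.1) true ≠ [] := by
      intro h
      rw [h] at hlen
      simp at hlen
    obtain ⟨m, tt, hss⟩ := List.exists_cons_of_ne_nil hnil
    have hhead := pvSorted_head (p :: t)
    rw [hss] at hhead
    simp only [List.head?_cons] at hhead
    rw [← habs] at hhead
    obtain ⟨w, hw⟩ : ∃ w, r.2 = some w := by
      cases h : r.2 with
      | none => rw [h] at hhead; simp at hhead
      | some w => exact ⟨w, rfl⟩
    rw [hw] at hhead
    simp only [Option.map_some, Option.some.injEq] at hhead
    rw [hss, hw, hhead]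
    simp only [List.isEmpty_cons, Bool.false_eq_true, if_false, PySem.List.pyGetD_zero_cons]

-- ===== VERDICT (by name: the statement is the Claim_ definition above) =====
theorem find_relevant_videos_fallback_spec : Claim_equal_find_relevant_videos_fallback := by
  intro question videos _ _
  unfold Spec_find_relevant_videos_fallback
  exact find_relevant_videos_fallback_eq question videos
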